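-- pv_equiv track=rewrite | github.com/MaCoredroid/Lumo_FlyWheel | benchmark_blueprints/families/skill-entrypoint-drift/workspace_bundle/tools/digest_runner.py | render_digest
-- ===== SOURCE A (Python) =====
-- def render_digest(events: list[dict[str, str]], summary_length: str) -> str:
--     total_events = len(events)
--     open_events = sum(1 for event in events if event.get("status") == "open")
--     severities = [event.get("severity", "unknown") for event in events]
--     highest_severity = min(severities, default="unknown", key=_severity_rank)
--
--     lines = [
--         "# Ops Digest",
--         "",
--         "## Summary",
--         f"- Total events: {total_events}",
--         f"- Open incidents: {open_events}",
--         f"- Highest severity: {highest_severity}",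
--     ]
--
--     if summary_length == "long":
--         impacted_services = sorted({event.get("service", "unknown") for event in events})
--         lines.append(f"- Impacted services: {', '.join(impacted_services) or 'none'}")
--
--     lines.extend(["", "## Events"])
--     if not events:
--         lines.append("- No incidents recorded.")
--     else:
--         for event in events:
--             lines.append(
--                 "- {date} | {severity} | {service} | {status} | {summary}".format(
--                     date=event.get("date", "unknown-date"),
--                     severity=event.get("severity", "unknown"),
--                     service=event.get("service", "unknown-service"),
--                     status=event.get("status", "unknown"),
--                     summary=event.get("summary", "No summary provided."),
--                 )
--             )
--
--     return "\n".join(lines) + "\n"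
--
-- def _severity_rank(severity: str) -> tuple[int, str]:
--     order = {"sev1": 1, "sev2": 2, "sev3": 3, "sev4": 4}
--     return (order.get(severity, 99), severity)
-- ===== SOURCE B (Python) =====
-- _SEV_ORDER = {"sev1": 1, "sev2": 2, "sev3": 3, "sev4": 4}
--
--
-- def _rank(severity):
--     return (_SEV_ORDER.get(severity, 99), severity)
--
--
-- def render_digest(events: list[dict[str, str]], summary_length: str) -> str:
--     # One pass over events: accumulate every aggregate and the event lines together.
--     total = 0
--     open_count = 0
--     best = None
--     services = set()
--     event_lines = []
--     for event in events:
--         total += 1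
--         if event.get("status") == "open":
--             open_count += 1
--         sev = event.get("severity", "unknown")
--         if best is None or _rank(sev) < _rank(best):
--             best = sev
--         services.add(event.get("service", "unknown"))
--         event_lines.append(
--             "- {} | {} | {} | {} | {}".format(
--                 event.get("date", "unknown-date"),
--                 sev,
--                 event.get("service", "unknown-service"),
--                 event.get("status", "unknown"),
--                 event.get("summary", "No summary provided."),
--             )
--         )
--
--     out = [
--         "# Ops Digest",
--         "",
--         "## Summary",
--         f"- Total events: {total}",
--         f"- Open incidents: {open_count}",
--         f"- Highest severity: {best if best is not None else 'unknown'}",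
--     ]
--     if summary_length == "long":
--         joined = ", ".join(sorted(services))
--         out.append(f"- Impacted services: {joined if joined else 'none'}")
--     out.extend(["", "## Events"])
--     out.extend(event_lines if event_lines else ["- No incidents recorded."])
--     return "\n".join(out) + "\n"
-- ===== Notes on version B (the rewrite author's own statement) =====
-- stated objective: alternative
-- what changed: B replaces A's five separate passes over events (len, open-count generator, severities list + min, service set comprehension, line-building loop) with one accumulating loop that maintains total, open count, first-minimal severity, the service set and the formatted lines together, assembling the report afterwards.
import Mathlib
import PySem

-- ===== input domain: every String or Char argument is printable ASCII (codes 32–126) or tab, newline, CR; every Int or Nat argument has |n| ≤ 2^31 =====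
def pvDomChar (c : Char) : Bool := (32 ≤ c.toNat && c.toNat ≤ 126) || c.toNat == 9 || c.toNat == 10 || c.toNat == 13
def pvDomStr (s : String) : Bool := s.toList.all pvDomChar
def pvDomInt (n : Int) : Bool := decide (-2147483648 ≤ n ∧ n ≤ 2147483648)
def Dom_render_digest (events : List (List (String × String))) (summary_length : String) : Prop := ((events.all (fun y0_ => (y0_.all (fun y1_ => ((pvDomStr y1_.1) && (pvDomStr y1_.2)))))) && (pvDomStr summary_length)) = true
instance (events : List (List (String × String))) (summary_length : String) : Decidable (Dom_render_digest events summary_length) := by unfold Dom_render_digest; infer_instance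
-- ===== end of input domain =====

-- B re-implements A as a single accumulating pass over the events (total, open count,
-- first-minimal severity, service set and the event lines maintained together);
-- objective: simpler/alternative decomposition, same exact output.

-- ===== PORT A =====
-- event.get(k) / event.get(k, d): dict = assoc list, first match
def pvEvGet? (e : List (String × String)) (k : String) : Option String :=
  (e.find? (fun p => p.1 == k)).map (·.2)

def pvEvGet (e : List (String × String)) (k d : String) : String :=
  (pvEvGet? e k).getD d

-- _severity_rank's order.get(severity, 99), written as the literal lookup chain
def pvSevRank (s : String) : Int :=
  if s == "sev1" then 1 else if s == "sev2" then 2 else if s == "sev3" then 3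
  else if s == "sev4" then 4 else 99

-- lexicographic comparison of the key tuples (order.get(s, 99), s)
def pvRankLt (a b : String) : Bool :=
  pvSevRank a < pvSevRank b || (pvSevRank a == pvSevRank b && a < b)

-- min(xs, default="unknown", key=_severity_rank): first minimal element (hand port of
-- Python's min — the pair key is compared component-explicitly, per the PySem note)
def pvMinSev (xs : List String) : String :=
  (xs.foldl (fun best x =>
      match best with
      | none => some x
      | some b => if pvRankLt x b then some x else some b) none).getD "unknown"

-- the "- {date} | {severity} | {service} | {status} | {summary}" line of A's loop body
def pvEventLine (e : List (String × String)) : String :=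
  "- " ++ pvEvGet e "date" "unknown-date" ++ " | " ++ pvEvGet e "severity" "unknown" ++ " | " ++
  pvEvGet e "service" "unknown-service" ++ " | " ++ pvEvGet e "status" "unknown" ++ " | " ++
  pvEvGet e "summary" "No summary provided."

def render_digest (events : List (List (String × String))) (summary_length : String) : String :=
  let total : Int := (events.length : Int)
  let openEvents : Int :=
    events.foldl (fun acc e => if pvEvGet? e "status" == some "open" then acc + 1 else acc) 0
  let severities := events.map (fun e => pvEvGet e "severity" "unknown")
  let highest := pvMinSev severities
  let lines := ["# Ops Digest", "", "## Summary",
    "- Total events: " ++ PySem.Int.toStr total,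
    "- Open incidents: " ++ PySem.Int.toStr openEvents,
    "- Highest severity: " ++ highest]
  let lines := if summary_length == "long" then
      let impacted := PySem.List.sorted
        (PySem.Set.ofList (events.map (fun e => pvEvGet e "service" "unknown"))) (fun x => x) false
      let joined := PySem.Str.join ", " impacted   -- ', '.join(...) or 'none'
      lines ++ ["- Impacted services: " ++ (if joined == "" then "none" else joined)]
    else lines
  let lines := lines ++ ["", "## Events"]
  let lines := if events.isEmpty then lines ++ ["- No incidents recorded."]
    else events.foldl (fun acc e => acc ++ [pvEventLine e]) lines
  PySem.Str.join "\n" lines ++ "\n"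

-- ===== PORT B =====
-- the body of B's single loop: one step over the 5-component accumulator
def pvStepB (st : Int × Int × Option String × PySem.Set String × List String)
    (e : List (String × String)) : Int × Int × Option String × PySem.Set String × List String :=
  let sev := pvEvGet e "severity" "unknown"
  (st.1 + 1,
   (if pvEvGet? e "status" == some "open" then st.2.1 + 1 else st.2.1),
   (match st.2.2.1 with
    | none => some sev
    | some b => if pvRankLt sev b then some sev else some b),
   PySem.Set.add st.2.2.2.1 (pvEvGet e "service" "unknown"),
   st.2.2.2.2 ++ ["- " ++ pvEvGet e "date" "unknown-date" ++ " | " ++ sev ++ " | " ++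
     pvEvGet e "service" "unknown-service" ++ " | " ++ pvEvGet e "status" "unknown" ++ " | " ++
     pvEvGet e "summary" "No summary provided."])

def render_digest_alt (events : List (List (String × String))) (summary_length : String) : String :=
  let st := events.foldl pvStepB (0, 0, none, PySem.Set.empty, [])
  let out := ["# Ops Digest", "", "## Summary",
    "- Total events: " ++ PySem.Int.toStr st.1,
    "- Open incidents: " ++ PySem.Int.toStr st.2.1,
    "- Highest severity: " ++ (st.2.2.1).getD "unknown"]
  let out := if summary_length == "long" then
      let joined := PySem.Str.join ", " (PySem.List.sorted st.2.2.2.1 (fun x => x) false)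
      out ++ ["- Impacted services: " ++ (if joined == "" then "none" else joined)]
    else out
  let out := out ++ ["", "## Events"]
  let out := out ++ (if st.2.2.2.2.isEmpty then ["- No incidents recorded."] else st.2.2.2.2)
  PySem.Str.join "\n" out ++ "\n"

-- ===== PRECONDITION & SPEC =====
def Spec_render_digest (events : List (List (String × String))) (summary_length : String) (out : String) : Prop := out = render_digest_alt events summary_length
instance (events : List (List (String × String))) (summary_length : String) (out : String) : Decidable (Spec_render_digest events summary_length out) := by unfold Spec_render_digest; infer_instance

-- ===== CLAIM (what is proved, stated in full; the proofs are below) =====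
def Claim_equal_render_digest : Prop := ∀ (events : List (List (String × String))) (summary_length : String), Dom_render_digest events summary_length → Spec_render_digest events summary_length (render_digest events summary_length)

-- ===== LEMMAS AND PROOFS =====

-- closed form of B's single pass
theorem foldl_pvStepB (events : List (List (String × String)))
    (t o : Int) (best : Option String) (svcs : PySem.Set String) (ls : List String) :
    events.foldl pvStepB (t, o, best, svcs, ls) =
      (t + (events.length : Int),
       events.foldl (fun acc e => if pvEvGet? e "status" == some "open" then acc + 1 else acc) o,
       events.foldl (fun b e =>
          match b with
          | none => some (pvEvGet e "severity" "unknown")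
          | some bb => if pvRankLt (pvEvGet e "severity" "unknown") bb
                       then some (pvEvGet e "severity" "unknown") else some bb) best,
       events.foldl (fun s e => PySem.Set.add s (pvEvGet e "service" "unknown")) svcs,
       ls ++ events.map pvEventLine) := by
  induction events generalizing t o best svcs ls with
  | nil => simp
  | cons e tl ih =>
    simp only [List.foldl_cons, List.map_cons, pvStepB]
    rw [ih]
    simp only [List.length_cons, Prod.mk.injEq, pvEventLine]
    refine ⟨by push_cast; ring, ?_, ?_, ?_, ?_⟩ <;> simp

theorem render_digest_eq_alt (events : List (List (String × String))) (summary_length : String) :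
    render_digest events summary_length = render_digest_alt events summary_length := by
  unfold render_digest render_digest_alt
  rw [foldl_pvStepB]
  simp only [pvMinSev, PySem.Set.ofList_eq_foldl, List.foldl_map, PySem.Set.empty,
    List.nil_append, zero_add]
  cases events with
  | nil => simp
  | cons e tl =>
    rw [PySem.List.foldl_append_singleton_eq_map]
    simp

-- ===== VERDICT (by name: the statement is the Claim_ definition above) =====
theorem render_digest_spec : Claim_equal_render_digest := by
  intro events summary_length _
  unfold Spec_render_digest
  exact render_digest_eq_alt events summary_length
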